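-- pv_equiv track=rewrite | github.com/Zahid8/ESM3-Adapters | Scripts/imp_mutations.py | compute_mutation_counts
-- ===== SOURCE A (Python) =====
-- def compute_mutation_counts(seqs):
--     seq_length = len(seqs[0])
--     counts = [0] * seq_length
--
--     for ref_seq in seqs:
--         for seq in seqs:
--             if seq is ref_seq:
--                 continue
--             for i, (a, b) in enumerate(zip(ref_seq, seq)):
--                 if a != b:
--                     counts[i] += 1
--
--     return counts
-- ===== SOURCE B (Python) =====
-- def compute_mutation_counts(seqs):
--     length = len(seqs[0])
--     counts = []
--     for i in range(length):
--         chars = [s[i] for s in seqs if i < len(s)]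
--         freq = {}
--         for c in chars:
--             freq[c] = freq.get(c, 0) + 1
--         same = 0
--         for c in chars:
--             same += freq[c]
--         counts.append(len(chars) * len(chars) - same)
--     return counts
-- ===== Notes on version B (the rewrite author's own statement) =====
-- stated objective: faster
-- what changed: Replaced the all-pairs double loop over sequences (O(N^2*L)) by per-column character frequency counting (mismatching ordered pairs at column i = n_i^2 - sum of freq[c] over the column's occurrences), O(N*L).
import Mathlib
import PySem

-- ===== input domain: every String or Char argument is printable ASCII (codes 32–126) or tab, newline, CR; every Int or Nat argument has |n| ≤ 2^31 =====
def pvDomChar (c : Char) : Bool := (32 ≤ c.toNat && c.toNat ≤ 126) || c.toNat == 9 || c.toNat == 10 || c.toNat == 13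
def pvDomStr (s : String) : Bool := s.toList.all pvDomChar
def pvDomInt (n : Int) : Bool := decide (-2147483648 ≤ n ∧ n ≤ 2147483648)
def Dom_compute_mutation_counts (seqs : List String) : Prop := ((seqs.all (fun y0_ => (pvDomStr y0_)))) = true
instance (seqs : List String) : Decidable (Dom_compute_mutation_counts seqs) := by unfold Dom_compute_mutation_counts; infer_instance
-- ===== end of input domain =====

-- B replaces A's all-pairs double loop by per-column frequency counting (measured faster by
-- a timing run); equality of RETURN values is proved on Pre_ (inputs where A returns).

-- ===== PORT A =====
-- counts[i] += 1 (Python indexing/assignment semantics)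
def pvStepA (c2 : List Int) (p : Int × (Char × Char)) : List Int :=
  if p.2.1 ≠ p.2.2 then PySem.List.pySetD c2 p.1 (PySem.List.pyGetD c2 p.1 0 + 1) else c2

-- for i, (a, b) in enumerate(zip(ref_seq, seq)): if a != b: counts[i] += 1
def pvInnerA (ref sq : String) (c : List Int) : List Int :=
  (PySem.List.enumerate (ref.toList.zip sq.toList) 0).foldl pvStepA c

-- for seq in seqs: if seq is ref_seq: continue; …
-- (`seq is ref_seq` object identity is ported as same-position equality: both loops carry their
--  enumerate index, and the middle loop skips the occurrence the outer loop is at — exact, since a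
--  value-equal pair contributes no mismatches either way)
def pvMidA (seqs : List String) (ref : Int × String) (counts : List Int) : List Int :=
  (PySem.List.enumerate seqs 0).foldl
    (fun c sq => if sq.1 = ref.1 then c else pvInnerA ref.2 sq.2 c) counts

def compute_mutation_counts (seqs : List String) : List Int :=
  match seqs with
  | [] => []  -- Python raises IndexError on seqs[0]; excluded by Pre_
  | s0 :: _ =>
    (PySem.List.enumerate seqs 0).foldl (fun counts ref => pvMidA seqs ref counts)
      (List.replicate s0.toList.length (0 : Int))

-- ===== PORT B =====
def compute_mutation_counts_alt (seqs : List String) : List Int :=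
  match seqs with
  | [] => []  -- Python raises IndexError on seqs[0] (natural domain: nonempty list)
  | s0 :: _ =>
    (List.range s0.toList.length).map (fun i =>
      let chars := seqs.filterMap (fun s => s.toList[i]?)   -- [s[i] for s in seqs if i < len(s)]
      let freq := chars.foldl (fun d c => d.insert c (d.getD c 0 + 1)) (PySem.Dict.empty)
      let same := chars.foldl (fun acc c => acc + freq.getD c 0) (0 : Int)
      (chars.length : Int) * chars.length - same)

-- ===== PRECONDITION & SPEC =====
-- Pre_ excludes exactly the inputs where the Python A raises: the empty list (seqs[0] is an
-- IndexError) and ragged inputs where some pair of sequences differs at a position ≥ len(seqs[0])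
-- (the write counts[i] += 1 is an IndexError there).
def Pre_compute_mutation_counts (seqs : List String) : Prop :=
  seqs ≠ [] ∧ ∀ s ∈ seqs, ∀ t ∈ seqs, ∀ i ∈ List.range (min s.toList.length t.toList.length),
    s.toList.getD i ' ' ≠ t.toList.getD i ' ' → i < (seqs.headI).toList.length
instance (seqs : List String) : Decidable (Pre_compute_mutation_counts seqs) := by
  unfold Pre_compute_mutation_counts; infer_instance

def pvWitness_compute_mutation_counts : List String := ["ab", "ac", "bb"]

def Spec_compute_mutation_counts (seqs : List String) (out : List Int) : Prop :=
  out = compute_mutation_counts_alt seqs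
instance (seqs : List String) (out : List Int) : Decidable (Spec_compute_mutation_counts seqs out) := by
  unfold Spec_compute_mutation_counts; infer_instance

-- ===== CLAIM (what is proved, stated in full; the proofs are below) =====
def Claim_equal_compute_mutation_counts : Prop := ∀ (seqs : List String), Dom_compute_mutation_counts seqs → Pre_compute_mutation_counts seqs → Spec_compute_mutation_counts seqs (compute_mutation_counts seqs)

-- ===== LEMMAS AND PROOFS =====

-- mismatch indicator of two rows at column i (0 when either row is shorter)
def pvDcnt (r s : List Char) (i : Nat) : Int :=
  ((r[i]?).map (fun a => ((s[i]?).map (fun b => if a ≠ b then (1 : Int) else 0)).getD 0)).getD 0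

-- the characters sitting in column i
def pvCol (seqs : List String) (i : Nat) : List Char := seqs.filterMap (fun s => s.toList[i]?)

lemma pvDcnt_self (r : List Char) (i : Nat) : pvDcnt r r i = 0 := by
  unfold pvDcnt; cases r[i]? <;> simp

lemma pv_getD_set (c : List Int) (st : Nat) (v : Int) (i : Nat) :
    (c.set st v).getD i 0 = if i = st ∧ st < c.length then v else c.getD i 0 := by
  simp only [List.getD_eq_getElem?_getD, List.getElem?_set]
  by_cases h1 : st = i
  · subst h1
    by_cases h2 : st < c.length <;> simp [h2]
  · rw [if_neg h1, if_neg (by rintro ⟨h, -⟩; exact h1 h.symm)]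

lemma pvStepA_getD (c : List Int) (st : Nat) (x : Char × Char) (i : Nat) :
    (pvStepA c ((st : Int), x)).getD i 0
    = c.getD i 0 + (if i < c.length ∧ i = st ∧ x.1 ≠ x.2 then 1 else 0) := by
  unfold pvStepA
  by_cases hx : x.1 = x.2
  · simp [hx]
  · rw [if_pos hx]
    simp only [PySem.List.pySetD_natCast, PySem.List.pyGetD_natCast, pv_getD_set]
    by_cases h1 : i = st
    · subst h1
      by_cases h2 : i < c.length
      · rw [if_pos ⟨rfl, h2⟩, if_pos ⟨h2, rfl, hx⟩]
      · rw [if_neg (by rintro ⟨-, h⟩; exact h2 h), if_neg (by rintro ⟨h, -⟩; exact h2 h)]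
        ring
    · rw [if_neg (by rintro ⟨h, -⟩; exact h1 h), if_neg (by rintro ⟨-, h, -⟩; exact h1 h)]
      ring

lemma pvStepA_length (c : List Int) (p : Int × (Char × Char)) :
    (pvStepA c p).length = c.length := by
  unfold pvStepA; split <;> simp [PySem.List.length_pySetD]

lemma pvInner_foldl_length (l : List (Char × Char)) (st : Int) (c : List Int) :
    ((PySem.List.enumerate l st).foldl pvStepA c).length = c.length := by
  induction l generalizing st c with
  | nil => simp [PySem.List.enumerate_nil]
  | cons x l ih => simp [PySem.List.enumerate_cons, List.foldl_cons, ih, pvStepA_length]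

lemma pvInner_foldl_getD (l : List (Char × Char)) (st : Nat) (c : List Int) (i : Nat) :
    ((PySem.List.enumerate l (st : Int)).foldl pvStepA c).getD i 0
    = c.getD i 0 + (if i < c.length ∧ st ≤ i ∧ i - st < l.length ∧
        (l.getD (i - st) default).1 ≠ (l.getD (i - st) default).2 then 1 else 0) := by
  induction l generalizing st c with
  | nil =>
    rw [PySem.List.enumerate_nil, List.foldl_nil, if_neg, add_zero]
    rintro ⟨-, -, h, -⟩
    simp at h
  | cons x l ih =>
    rw [PySem.List.enumerate_cons, List.foldl_cons,
        show (st : Int) + 1 = ((st + 1 : Nat) : Int) by push_cast; ring, ih, pvStepA_getD,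
        pvStepA_length]
    by_cases h1 : i < c.length
    case neg =>
      rw [if_neg (by rintro ⟨h, -⟩; exact h1 h), if_neg (by rintro ⟨h, -⟩; exact h1 h),
          if_neg (by rintro ⟨h, -⟩; exact h1 h)]
      ring
    case pos =>
      by_cases h2 : i = st
      · subst h2
        rw [Nat.sub_self, List.getD_cons_zero]
        by_cases hx : x.1 = x.2
        · rw [if_neg (by rintro ⟨-, -, h⟩; exact h hx), if_neg (by rintro ⟨-, h, -⟩; omega),
              if_neg (by rintro ⟨-, -, -, h⟩; exact h hx)]
          ring
        · rw [if_pos ⟨h1, rfl, hx⟩, if_neg (by rintro ⟨-, h, -⟩; omega),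
              if_pos ⟨h1, Nat.le_refl _, Nat.succ_pos _, hx⟩]
          ring
      · rw [if_neg (by rintro ⟨-, h, -⟩; exact h2 h), add_zero]
        by_cases h3 : st + 1 ≤ i
        · have hss : i - st = (i - (st + 1)) + 1 := by omega
          rw [hss, List.getD_cons_succ]
          congr 1
          apply if_congr ?_ rfl rfl
          constructor
          · rintro ⟨a, -, b, d⟩
            exact ⟨a, by omega, by simp only [List.length_cons]; omega, d⟩
          · rintro ⟨a, -, b, d⟩
            refine ⟨a, h3, by simp only [List.length_cons] at b; omega, d⟩
        · rw [if_neg (by rintro ⟨-, h, -⟩; exact h3 h), if_neg (by rintro ⟨-, h, -⟩; omega)]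

lemma pvDcnt_eq_zip (r s : List Char) (i : Nat) :
    (if i < (r.zip s).length ∧ ((r.zip s).getD i default).1 ≠ ((r.zip s).getD i default).2
     then (1 : Int) else 0) = pvDcnt r s i := by
  unfold pvDcnt
  by_cases h : i < (r.zip s).length
  · have hr : i < r.length := by rw [List.length_zip] at h; omega
    have hs : i < s.length := by rw [List.length_zip] at h; omega
    rw [List.getD_eq_getElem _ _ h, List.getElem_zip, List.getElem?_eq_getElem hr,
        List.getElem?_eq_getElem hs]
    by_cases he : r[i] = s[i] <;> simp [he, hr, hs]
  · rw [if_neg (by rintro ⟨hh, -⟩; exact h hh)]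
    rw [List.length_zip] at h
    rcases Nat.lt_or_ge i r.length with hr | hr
    · have hs : s.length ≤ i := by omega
      rw [List.getElem?_eq_none hs]
      cases r[i]? <;> simp
    · rw [List.getElem?_eq_none hr]
      simp

lemma pvInnerA_length (ref sq : String) (c : List Int) :
    (pvInnerA ref sq c).length = c.length := by
  unfold pvInnerA; exact pvInner_foldl_length _ _ _

lemma pvInnerA_getD (ref sq : String) (c : List Int) (i : Nat) (hi : i < c.length) :
    (pvInnerA ref sq c).getD i 0 = c.getD i 0 + pvDcnt ref.toList sq.toList i := by
  have h0 := pvInner_foldl_getD (ref.toList.zip sq.toList) 0 c i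
  simp only [Nat.cast_zero, Nat.sub_zero, Nat.zero_le, true_and] at h0
  unfold pvInnerA
  rw [h0]
  congr 1
  rw [← pvDcnt_eq_zip ref.toList sq.toList i]
  apply if_congr ?_ rfl rfl
  constructor
  · rintro ⟨-, h, hd⟩; exact ⟨h, hd⟩
  · rintro ⟨h, hd⟩; exact ⟨hi, h, hd⟩

lemma pvMid_foldl_length (j : Int) (r : String) (E : List (Int × String)) (c : List Int) :
    (E.foldl (fun c sq => if sq.1 = j then c else pvInnerA r sq.2 c) c).length = c.length := by
  induction E generalizing c with
  | nil => rfl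
  | cons x E ih =>
    rw [List.foldl_cons, ih]
    by_cases hx : x.1 = j
    · rw [if_pos hx]
    · rw [if_neg hx, pvInnerA_length]

lemma pvMidA_length (seqs : List String) (ref : Int × String) (c : List Int) :
    (pvMidA seqs ref c).length = c.length := by
  unfold pvMidA; exact pvMid_foldl_length _ _ _ _

lemma pvMid_foldl_getD (j : Int) (r : String) (E : List (Int × String)) (c : List Int)
    (i : Nat) (hi : i < c.length) :
    ((E.foldl (fun c sq => if sq.1 = j then c else pvInnerA r sq.2 c) c).getD i 0)
    = c.getD i 0 + (E.map (fun sq => if sq.1 = j then 0 else pvDcnt r.toList sq.2.toList i)).sum := by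
  induction E generalizing c with
  | nil => simp
  | cons x E ih =>
    rw [List.foldl_cons, List.map_cons, List.sum_cons]
    by_cases hx : x.1 = j
    · rw [if_pos hx, if_pos hx, ih _ hi]
      ring
    · rw [if_neg hx, if_neg hx, ih _ (by rw [pvInnerA_length]; exact hi),
          pvInnerA_getD _ _ _ _ hi]
      ring

lemma pv_map_if_sum (l : List (Int × String)) (j : Int) (f : Int × String → Int)
    (h : ∀ x ∈ l, x.1 = j → f x = 0) :
    (l.map (fun x => if x.1 = j then 0 else f x)).sum = (l.map f).sum := by
  induction l with
  | nil => rfl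
  | cons x l ih =>
    simp only [List.map_cons, List.sum_cons, ih (fun y hy => h y (List.mem_cons_of_mem _ hy))]
    by_cases hp : x.1 = j
    · simp [hp, h x (List.mem_cons_self) hp]
    · simp [hp]

lemma pvMidA_getD (seqs : List String) (ref : Int × String)
    (href : ref ∈ PySem.List.enumerate seqs 0) (c : List Int) (i : Nat) (hi : i < c.length) :
    (pvMidA seqs ref c).getD i 0
    = c.getD i 0 + (seqs.map (fun s => pvDcnt ref.2.toList s.toList i)).sum := by
  unfold pvMidA
  rw [pvMid_foldl_getD _ _ _ _ _ hi]
  congr 1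
  rw [pv_map_if_sum _ ref.1 _ ?_]
  · rw [show (fun sq : Int × String => pvDcnt ref.2.toList sq.2.toList i)
        = (fun s : String => pvDcnt ref.2.toList s.toList i) ∘ Prod.snd from rfl,
      ← List.map_map, PySem.List.map_snd_enumerate]
  · intro sq hsq hfst
    rcases (PySem.List.mem_enumerate_iff _ _ _).1 href with ⟨k, hk, hrefk⟩
    rcases (PySem.List.mem_enumerate_iff _ _ _).1 hsq with ⟨k', hk', hsqk⟩
    have hkk : k = k' := by
      have : (0 : Int) + k' = (0 : Int) + k := by
        rw [show ((0:Int) + k' : Int) = sq.1 by rw [hsqk],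
            show ((0:Int) + k : Int) = ref.1 by rw [hrefk], hfst]
      omega
    subst hkk
    have : sq.2 = ref.2 := by rw [hsqk, hrefk]
    rw [this]
    exact pvDcnt_self _ _

lemma pvOuter_foldl_length (seqs : List String) (E : List (Int × String)) (c : List Int) :
    ((E.foldl (fun counts ref => pvMidA seqs ref counts) c).length) = c.length := by
  induction E generalizing c with
  | nil => rfl
  | cons x E ih => simp [List.foldl_cons, ih, pvMidA_length]

lemma pvOuter_foldl_getD (seqs : List String) (E : List (Int × String))
    (hE : ∀ p ∈ E, p ∈ PySem.List.enumerate seqs 0) (c : List Int) (i : Nat) (hi : i < c.length) :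
    ((E.foldl (fun counts ref => pvMidA seqs ref counts) c).getD i 0)
    = c.getD i 0 + (E.map (fun ref => (seqs.map (fun s => pvDcnt ref.2.toList s.toList i)).sum)).sum := by
  induction E generalizing c with
  | nil => simp
  | cons x E ih =>
    simp only [List.foldl_cons, List.map_cons, List.sum_cons]
    rw [ih (fun p hp => hE p (List.mem_cons_of_mem _ hp)) _ (by rw [pvMidA_length]; exact hi),
        pvMidA_getD seqs x (hE x List.mem_cons_self) c i hi]
    ring

-- sum over rows of a column-i observation = sum over the column's characters
lemma pv_sum_filterMap (seqs : List String) (g : Char → Int) (i : Nat) :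
    (seqs.map (fun s => ((s.toList[i]?).map g).getD 0)).sum = ((pvCol seqs i).map g).sum := by
  induction seqs with
  | nil => rfl
  | cons s seqs ih =>
    simp only [List.map_cons, List.sum_cons, pvCol, List.filterMap_cons]
    cases h : s.toList[i]? with
    | none => simpa [pvCol] using ih
    | some a => simp only [Option.map_some, Option.getD_some, List.map_cons, List.sum_cons]
                rw [ih]; rfl

lemma pv_sum_indicator (l : List Char) (a : Char) :
    (l.map (fun b => if a ≠ b then (1 : Int) else 0)).sum = l.length - l.count a := by
  induction l with
  | nil => simp
  | cons b l ih =>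
    simp only [List.map_cons, List.sum_cons, List.count_cons, List.length_cons, ih]
    by_cases hb : a = b
    · subst hb
      rw [if_neg (by simp), if_pos (by simp)]
      push_cast; ring
    · rw [if_pos hb, if_neg (by simp [Ne.symm hb])]
      push_cast; ring

lemma pv_sum_sub_const (l : List Char) (n : Int) (f : Char → Int) :
    (l.map (fun a => n - f a)).sum = n * l.length - (l.map f).sum := by
  induction l with
  | nil => simp
  | cons a l ih => simp [ih]; ring

lemma pv_row_sum (seqs : List String) (r : List Char) (i : Nat) :
    (seqs.map (fun s => pvDcnt r s.toList i)).sum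
    = ((r[i]?).map (fun a => ((pvCol seqs i).length : Int) - (pvCol seqs i).count a)).getD 0 := by
  cases h : r[i]? with
  | none =>
    have hz : ∀ s : String, pvDcnt r s.toList i = 0 := by
      intro s; unfold pvDcnt; rw [h]; rfl
    simp [hz]
  | some a =>
    simp only [Option.map_some, Option.getD_some]
    have hz : ∀ s : String, pvDcnt r s.toList i
        = ((s.toList[i]?).map (fun b => if a ≠ b then (1 : Int) else 0)).getD 0 := by
      intro s; unfold pvDcnt; rw [h]; rfl
    simp only [hz]
    rw [pv_sum_filterMap seqs (fun b => if a ≠ b then (1 : Int) else 0) i, pv_sum_indicator]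

-- the double-sum A accumulates at column i equals n² − Σ_{a∈col} count a
lemma pv_pairSum (seqs : List String) (i : Nat) :
    (seqs.map (fun r => (seqs.map (fun s => pvDcnt r.toList s.toList i)).sum)).sum
    = ((pvCol seqs i).length : Int) * (pvCol seqs i).length
      - ((pvCol seqs i).map (fun a => ((pvCol seqs i).count a : Int))).sum := by
  simp only [pv_row_sum]
  rw [pv_sum_filterMap seqs (fun a => ((pvCol seqs i).length : Int) - (pvCol seqs i).count a) i,
      pv_sum_sub_const]

-- B's column value computes the same quantity
lemma pv_alt_col (seqs : List String) (i : Nat) :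
    (let chars := seqs.filterMap (fun s => s.toList[i]?)
     let freq := chars.foldl (fun d c => d.insert c (d.getD c 0 + 1)) (PySem.Dict.empty)
     let same := chars.foldl (fun acc c => acc + freq.getD c 0) (0 : Int)
     (chars.length : Int) * chars.length - same)
    = ((pvCol seqs i).length : Int) * (pvCol seqs i).length
      - ((pvCol seqs i).map (fun a => ((pvCol seqs i).count a : Int))).sum := by
  simp only
  rw [PySem.Dict.foldl_insert_getD_add_one_eq_counter]
  simp only [PySem.Dict.getD_counter, PySem.List.foldl_add, zero_add]
  rfl

-- ===== VERDICT (by name: the statement is the Claim_ definition above) =====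
theorem compute_mutation_counts_spec : Claim_equal_compute_mutation_counts := by
  intro seqs _ _
  unfold Spec_compute_mutation_counts
  cases seqs with
  | nil => rfl
  | cons s0 rest =>
    have hA : compute_mutation_counts (s0 :: rest)
        = (PySem.List.enumerate (s0 :: rest) 0).foldl
            (fun counts ref => pvMidA (s0 :: rest) ref counts)
            (List.replicate s0.toList.length (0 : Int)) := rfl
    have hB : compute_mutation_counts_alt (s0 :: rest)
        = (List.range s0.toList.length).map (fun i =>
            let chars := (s0 :: rest).filterMap (fun s => s.toList[i]?)
            let freq := chars.foldl (fun d c => d.insert c (d.getD c 0 + 1)) (PySem.Dict.empty)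
            let same := chars.foldl (fun acc c => acc + freq.getD c 0) (0 : Int)
            (chars.length : Int) * chars.length - same) := rfl
    rw [hA, hB]
    apply List.ext_getElem
    · rw [pvOuter_foldl_length]; simp
    · intro i h1 h2
      have hL : i < s0.toList.length := by simpa using h2
      have hrep : i < (List.replicate s0.toList.length (0 : Int)).length := by simpa using hL
      simp only [List.getElem_map, List.getElem_range]
      rw [pv_alt_col (s0 :: rest) i, ← List.getD_eq_getElem _ 0 h1,
          pvOuter_foldl_getD _ _ (fun p hp => hp) _ i hrep,
          List.getD_replicate _ hL, zero_add,
          show (fun ref : Int × String => (List.map (fun s => pvDcnt ref.2.toList s.toList i) (s0 :: rest)).sum)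
             = (fun r : String => (List.map (fun s => pvDcnt r.toList s.toList i) (s0 :: rest)).sum) ∘ Prod.snd from rfl,
          ← List.map_map, PySem.List.map_snd_enumerate, pv_pairSum]
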